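-- pv_equiv track=rewrite | github.com/vertebral-segmenter/vertebral-segmenter | data_preprocessing/image_analysis/data_extraction.py | scan_number
-- ===== SOURCE A (Python) =====
-- def scan_number(root_path):
--     for dir in root_path.split('\\'):
--         if dir.isnumeric():
--             return str(dir)
--         else:
--             for num in dir.split('_'):
--                 if num.isnumeric():
--                     return str(num)
--     return None
-- ===== SOURCE B (Python) =====
-- def scan_number(root_path):
--     # Single forward character scan: accumulate a token, test it at each
--     # delimiter ('\\' or '_') and at the end; no intermediate split lists.
--     tok = ""
--     for ch in root_path:
--         if ch == '\\' or ch == '_':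
--             if tok.isnumeric():
--                 return tok
--             tok = ""
--         else:
--             tok += ch
--     return tok if tok.isnumeric() else None
-- ===== Notes on version B (the rewrite author's own statement) =====
-- stated objective: alternative
-- what changed: Replaced A's backslash-split outer loop with whole-segment test plus underscore-split inner loop by a single forward character scan that accumulates a token and tests it at each delimiter and at the end.
import Mathlib
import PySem

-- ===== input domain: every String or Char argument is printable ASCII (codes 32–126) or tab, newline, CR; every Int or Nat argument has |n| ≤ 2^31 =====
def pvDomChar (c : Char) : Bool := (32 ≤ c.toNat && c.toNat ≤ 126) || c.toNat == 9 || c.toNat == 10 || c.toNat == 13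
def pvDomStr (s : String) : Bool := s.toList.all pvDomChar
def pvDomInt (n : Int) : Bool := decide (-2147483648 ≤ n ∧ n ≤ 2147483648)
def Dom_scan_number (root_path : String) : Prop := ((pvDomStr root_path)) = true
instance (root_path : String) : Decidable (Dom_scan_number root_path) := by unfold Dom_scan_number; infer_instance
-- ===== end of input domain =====

-- B replaces A's split-then-nested-loops with a single forward character scan that
-- accumulates tokens between the two delimiters (objective: alternative, same cost).
-- Python's str.isnumeric is ported as PySem.Chars.strIsdigit: on the printable-ASCII
-- domain Dom the two predicates coincide (only '0'..'9' qualify).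

-- ===== PORT A =====
-- inner loop: `for num in dir.split('_'): if num.isnumeric(): return num`
def scanInner : List (List Char) → Option String
  | [] => none
  | n :: rest => if PySem.Chars.strIsdigit n then some (String.ofList n) else scanInner rest

-- outer loop over root_path.split('\\')
def scanOuter : List (List Char) → Option String
  | [] => none
  | d :: rest =>
    if PySem.Chars.strIsdigit d then some (String.ofList d)
    else
      match scanInner (PySem.Chars.splitOn d ['_']) with
      | some n => some n
      | none => scanOuter rest

def scan_number (root_path : String) : Option String :=
  scanOuter (PySem.Chars.splitOn root_path.toList ['\\'])

-- ===== PORT B =====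
-- Source B's single pass: `tok` is the accumulated token, tested at each delimiter and at the end
def scanTok : List Char → List Char → Option String
  | tok, [] => if PySem.Chars.strIsdigit tok then some (String.ofList tok) else none
  | tok, c :: cs =>
    if c = '\\' ∨ c = '_' then
      if PySem.Chars.strIsdigit tok then some (String.ofList tok) else scanTok [] cs
    else scanTok (tok ++ [c]) cs

def scan_number_alt (root_path : String) : Option String :=
  scanTok [] root_path.toList

-- ===== PRECONDITION & SPEC =====
def Spec_scan_number (root_path : String) (out : Option String) : Prop := out = scan_number_alt root_path
instance (root_path : String) (out : Option String) : Decidable (Spec_scan_number root_path out) := by unfold Spec_scan_number; infer_instance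

-- ===== CLAIM (what is proved, stated in full; the proofs are below) =====
def Claim_equal_scan_number : Prop := ∀ (root_path : String), Dom_scan_number root_path → Spec_scan_number root_path (scan_number root_path)

-- ===== LEMMAS AND PROOFS =====

-- splitting a list on one character, the simple recursion
def splitc (c : Char) : List Char → List (List Char)
  | [] => [[]]
  | a :: t =>
    match splitc c t with
    | r :: rs => if a = c then [] :: r :: rs else (a :: r) :: rs
    | [] => [[]]

-- splitting on either delimiter
def splitB : List Char → List (List Char)
  | [] => [[]]
  | a :: t =>
    match splitB t with
    | r :: rs => if a = '\\' ∨ a = '_' then [] :: r :: rs else (a :: r) :: rs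
    | [] => [[]]

def mapHead (f : List Char → List Char) : List (List Char) → List (List Char)
  | [] => []
  | r :: rs => f r :: rs

def firstNum : List (List Char) → Option String
  | [] => none
  | t :: ts => if PySem.Chars.strIsdigit t then some (String.ofList t) else firstNum ts

theorem splitc_ne_nil (c : Char) (l : List Char) : splitc c l ≠ [] := by
  induction l with
  | nil => simp [splitc]
  | cons a t ih =>
    simp only [splitc]
    rcases h : splitc c t with _ | ⟨r, rs⟩
    · exact absurd h ih
    · split_ifs <;> simp

theorem splitB_ne_nil (l : List Char) : splitB l ≠ [] := by
  induction l with
  | nil => simp [splitB]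
  | cons a t ih =>
    simp only [splitB]
    rcases h : splitB t with _ | ⟨r, rs⟩
    · exact absurd h ih
    · split_ifs <;> simp

-- PySem's fuel-based splitOn on a single-character separator is splitc
theorem go_single (c : Char) :
    ∀ (fuel : Nat) (l cur : List Char) (acc : List (List Char)), l.length ≤ fuel →
    PySem.Chars.splitOn.go [c] fuel l cur acc =
      acc.reverse ++ mapHead (fun r => cur.reverse ++ r) (splitc c l) := by
  intro fuel
  induction fuel with
  | zero =>
    intro l cur acc h
    have : l = [] := List.eq_nil_of_length_eq_zero (Nat.le_zero.mp h)
    subst this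
    simp [PySem.Chars.splitOn.go, splitc, mapHead]
  | succ n ih =>
    intro l cur acc h
    cases l with
    | nil => simp [PySem.Chars.splitOn.go, splitc, mapHead]
    | cons a t =>
      by_cases hac : a = c
      · subst hac
        have hpre : List.isPrefixOf [a] (a :: t) = true := by
          simp [List.isPrefixOf]
        rw [PySem.Chars.splitOn.go]
        simp only [hpre, if_true, List.length_cons, List.length_nil, List.drop_succ_cons,
          List.drop_zero]
        rw [ih t [] (cur.reverse :: acc) (by simpa using Nat.lt_succ_iff.mp (by simpa using h))]
        simp only [splitc, List.reverse_cons, List.reverse_nil, List.nil_append]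
        rcases hs : splitc a t with _ | ⟨r, rs⟩
        · exact absurd hs (splitc_ne_nil a t)
        · simp [mapHead]
      · have hpre : List.isPrefixOf [c] (a :: t) = false := by
          simp [List.isPrefixOf]
          exact fun hh => absurd hh.symm hac
        rw [PySem.Chars.splitOn.go]
        simp only [hpre]
        rw [ih t (a :: cur) acc (by simpa using Nat.lt_succ_iff.mp (by simpa using h))]
        simp only [splitc]
        rcases hs : splitc c t with _ | ⟨r, rs⟩
        · exact absurd hs (splitc_ne_nil c t)
        · simp [mapHead, hac]

theorem splitOn_single (c : Char) (l : List Char) :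
    PySem.Chars.splitOn l [c] = splitc c l := by
  unfold PySem.Chars.splitOn
  rw [go_single c (l.length + 1) l [] [] (by omega)]
  rcases hs : splitc c l with _ | ⟨r, rs⟩
  · exact absurd hs (splitc_ne_nil c l)
  · simp [mapHead]

theorem splitc_no_sep (c : Char) (d : List Char) (h : ∀ a ∈ d, a ≠ c) :
    splitc c d = [d] := by
  induction d with
  | nil => rfl
  | cons a t ih =>
    have ht : splitc c t = [t] := ih (fun x hx => h x (List.mem_cons_of_mem a hx))
    simp [splitc, ht, h a (List.mem_cons_self)]

theorem splitc_of_digit (c : Char) (hc : PySem.Chars.isdigit c = false) (d : List Char)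
    (h : PySem.Chars.strIsdigit d = true) : splitc c d = [d] := by
  apply splitc_no_sep
  intro a ha hac
  subst hac
  have h2 : ∀ x ∈ d, PySem.Chars.isdigit x = true := by
    simp only [PySem.Chars.strIsdigit, Bool.and_eq_true, List.all_eq_true] at h
    exact h.2
  rw [h2 a ha] at hc
  simp at hc

theorem firstNum_append (xs ys : List (List Char)) :
    firstNum (xs ++ ys) =
      match firstNum xs with
      | some n => some n
      | none => firstNum ys := by
  induction xs with
  | nil => simp [firstNum]
  | cons t ts ih =>
    simp only [List.cons_append, firstNum]
    split_ifs <;> simp [ih]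

theorem scanInner_eq_firstNum (ts : List (List Char)) : scanInner ts = firstNum ts := by
  induction ts with
  | nil => rfl
  | cons t ts ih => simp [scanInner, firstNum, ih]

theorem scanOuter_eq (segs : List (List Char)) :
    scanOuter segs = firstNum (segs.flatMap (splitc '_')) := by
  induction segs with
  | nil => rfl
  | cons d rest ih =>
    simp only [scanOuter, List.flatMap_cons, firstNum_append, splitOn_single,
      scanInner_eq_firstNum, ih]
    by_cases hd : PySem.Chars.strIsdigit d = true
    · rw [splitc_of_digit '_' (by decide) d hd]
      simp [firstNum, hd]
    · simp [hd]

theorem flatMap_splitc_eq_splitB (s : List Char) :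
    (splitc '\\' s).flatMap (splitc '_') = splitB s := by
  induction s with
  | nil => rfl
  | cons a t ih =>
    rcases hs : splitc '\\' t with _ | ⟨r, rs⟩
    · exact absurd hs (splitc_ne_nil _ t)
    rcases hb : splitB t with _ | ⟨q, qs⟩
    · exact absurd hb (splitB_ne_nil t)
    rcases hq : splitc '_' r with _ | ⟨p, ps⟩
    · exact absurd hq (splitc_ne_nil _ r)
    rw [hs, hb] at ih
    simp only [List.flatMap_cons] at ih
    rw [hq] at ih
    simp only [List.cons_append] at ih
    have hpq : p = q := (List.cons.injEq _ _ _ _ ▸ ih).1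
    have hrest : ps ++ rs.flatMap (splitc '_') = qs := (List.cons.injEq _ _ _ _ ▸ ih).2
    by_cases h1 : a = '\\'
    · have hL : splitc '\\' (a :: t) = [] :: r :: rs := by simp [splitc, hs, h1]
      have hR : splitB (a :: t) = [] :: q :: qs := by simp [splitB, hb, h1]
      rw [hL, hR, List.flatMap_cons, List.flatMap_cons]
      simp only [splitc, List.nil_append, hq, List.cons_append]
      rw [hpq, hrest]
    · by_cases h2 : a = '_'
      · have hL : splitc '\\' (a :: t) = (a :: r) :: rs := by simp [splitc, hs, h1]
        have hR : splitB (a :: t) = [] :: q :: qs := by simp [splitB, hb, h2]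
        rw [hL, hR, List.flatMap_cons]
        have : splitc '_' (a :: r) = [] :: p :: ps := by simp [splitc, hq, h2]
        rw [this]
        simp only [List.cons_append]
        rw [hpq, hrest]
      · have hL : splitc '\\' (a :: t) = (a :: r) :: rs := by simp [splitc, hs, h1]
        have hR : splitB (a :: t) = (a :: q) :: qs := by
          simp [splitB, hb, h1, h2]
        rw [hL, hR, List.flatMap_cons]
        have : splitc '_' (a :: r) = (a :: p) :: ps := by simp [splitc, hq, h2]
        rw [this]
        simp only [List.cons_append]
        rw [hpq, hrest]

theorem scanTok_eq (cs : List Char) : ∀ (tok : List Char),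
    scanTok tok cs = firstNum (mapHead (fun r => tok ++ r) (splitB cs)) := by
  induction cs with
  | nil => intro tok; simp [scanTok, splitB, mapHead, firstNum]
  | cons c cs ih =>
    intro tok
    rcases hb : splitB cs with _ | ⟨q, qs⟩
    · exact absurd hb (splitB_ne_nil cs)
    by_cases hd : c = '\\' ∨ c = '_'
    · have hsplit : splitB (c :: cs) = [] :: q :: qs := by simp [splitB, hb, hd]
      rw [hsplit]
      by_cases h : PySem.Chars.strIsdigit tok = true
      · simp [scanTok, hd, h, mapHead, firstNum]
      · have hL : scanTok tok (c :: cs) = scanTok [] cs := by simp [scanTok, hd, h]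
        rw [hL, ih [], hb]
        simp [mapHead, firstNum, h]
    · have hsplit : splitB (c :: cs) = (c :: q) :: qs := by simp [splitB, hb, hd]
      have hL : scanTok tok (c :: cs) = scanTok (tok ++ [c]) cs := by simp [scanTok, hd]
      rw [hL, ih (tok ++ [c]), hb, hsplit]
      simp [mapHead]

-- ===== VERDICT (by name: the statement is the Claim_ definition above) =====
theorem scan_number_spec : Claim_equal_scan_number := by
  intro root_path _
  unfold Spec_scan_number scan_number scan_number_alt
  rw [splitOn_single, scanOuter_eq, flatMap_splitc_eq_splitB, scanTok_eq root_path.toList []]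
  rcases hb : splitB root_path.toList with _ | ⟨q, qs⟩
  · exact absurd hb (splitB_ne_nil _)
  · simp [mapHead]
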